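-- pv_equiv track=rewrite | github.com/dserfe/testloc | src/localization.py | get_closest_tests
-- ===== SOURCE A (Python) =====
-- def get_closest_tests(paths):
--     min_len = float("inf")
--     closest_tests = []
--
--     for path in paths:
--         if not path:
--             continue
--         if ".test_" not in path[0]:
--             continue
--
--         path_len = len(path)
--         if path_len < min_len:
--             min_len = path_len
--             closest_tests = [path[0]]
--         elif path_len == min_len:
--             closest_tests.append(path[0])
--
--     return sorted(set(closest_tests))
-- ===== SOURCE B (Python) =====
-- def get_closest_tests(paths):
--     valid = [p for p in paths if p and ".test_" in p[0]]
--     if not valid: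
--         return []
--     m = min(len(p) for p in valid)
--     return sorted({p[0] for p in valid if len(p) == m})
-- ===== Notes on version B (the rewrite author's own statement) =====
-- stated objective: simpler
-- what changed: Replaces A's single online-minimum loop with explicit state (running min plus rebuilt candidate list) by a two-pass decomposition: filter the valid paths, compute the minimum length, then collect and sort the matching first elements.
import Mathlib
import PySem

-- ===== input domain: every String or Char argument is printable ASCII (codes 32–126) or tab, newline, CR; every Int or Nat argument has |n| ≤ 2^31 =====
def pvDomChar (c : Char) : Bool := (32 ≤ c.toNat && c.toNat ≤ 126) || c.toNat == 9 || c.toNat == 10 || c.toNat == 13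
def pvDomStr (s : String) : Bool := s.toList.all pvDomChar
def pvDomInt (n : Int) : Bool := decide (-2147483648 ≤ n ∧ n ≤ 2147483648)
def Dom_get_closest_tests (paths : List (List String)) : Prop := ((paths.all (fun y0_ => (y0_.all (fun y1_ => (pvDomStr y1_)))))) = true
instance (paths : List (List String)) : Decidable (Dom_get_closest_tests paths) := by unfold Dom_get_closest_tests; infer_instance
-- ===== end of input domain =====

-- B replaces A's single online-minimum loop by an explicit filter / min / collect two-pass decomposition (simpler; same cost).


-- ===== PORT A =====
-- one iteration of A's for-loop: state = (min_len as Option Nat for float("inf"), closest_tests)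
def aStep (st : Option Nat × List String) (path : List String) : Option Nat × List String :=
  match path with
  | [] => st                                           -- if not path: continue
  | h :: _ =>
    if PySem.Str.isIn ".test_" h = false then st       -- if ".test_" not in path[0]: continue
    else
      match st with
      | (none, _) => (some path.length, [h])           -- path_len < inf
      | (some m, cl) =>
        if path.length < m then (some path.length, [h])
        else if path.length = m then (some m, cl ++ [h])
        else (some m, cl)

def get_closest_tests (paths : List (List String)) : List String :=
  let r := paths.foldl aStep (none, [])
  PySem.List.sorted (PySem.Set.ofList r.2) (fun x => x) false   -- sorted(set(closest_tests))

-- ===== PORT B =====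
-- p and ".test_" in p[0]
def bPred (p : List String) : Bool :=
  match p with
  | [] => false
  | h :: _ => PySem.Str.isIn ".test_" h

def get_closest_tests_alt (paths : List (List String)) : List String :=
  let valid := paths.filter bPred
  match valid with
  | [] => []                                           -- if not valid: return []
  | v :: vs =>
    let m := (vs.map List.length).foldl min v.length   -- m = min(len(p) for p in valid)
    PySem.List.sorted
      (PySem.Set.ofList ((valid.filter (fun p => p.length = m)).map (fun p => p.headI)))
      (fun x => x) false                               -- sorted({p[0] for p in valid if len(p) == m})

-- ===== PRECONDITION & SPEC =====
def Spec_get_closest_tests (paths : List (List String)) (out : List String) : Prop := out = get_closest_tests_alt paths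
instance (paths : List (List String)) (out : List String) : Decidable (Spec_get_closest_tests paths out) := by unfold Spec_get_closest_tests; infer_instance

-- ===== CLAIM (what is proved, stated in full; the proofs are below) =====
def Claim_equal_get_closest_tests : Prop := ∀ (paths : List (List String)), Dom_get_closest_tests paths → Spec_get_closest_tests paths (get_closest_tests paths)

-- ===== LEMMAS AND PROOFS =====

-- min over the lengths of the valid paths of xs, seeded with m
def minAll (xs : List (List String)) (m : Nat) : Nat :=
  ((xs.filter bPred).map List.length).foldl min m

-- first elements of the valid paths of xs whose length is k
def firsts (xs : List (List String)) (k : Nat) : List String :=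
  ((xs.filter bPred).filter (fun p => p.length = k)).map (fun p => p.headI)

theorem minAll_le (xs : List (List String)) (m : Nat) : minAll xs m ≤ m := by
  unfold minAll
  induction xs generalizing m with
  | nil => simp
  | cons p xs ih =>
    by_cases h : bPred p = true <;>
      simp [h]
    · exact le_trans (ih (min m p.length)) (min_le_left _ _)
    · exact ih m

theorem aStep_some (m : Nat) (acc : List String) (p : List String) :
    aStep (some m, acc) p =
      if bPred p then
        (if p.length < m then (some p.length, [p.headI])
         else if p.length = m then (some m, acc ++ [p.headI])
         else (some m, acc))
      else (some m, acc) := by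
  cases p with
  | nil => simp [aStep, bPred]
  | cons h t =>
    simp only [aStep, bPred, List.headI]
    cases hin : PySem.Str.isIn ".test_" h <;> simp

theorem aStep_none (acc : List String) (p : List String) :
    aStep (none, acc) p =
      if bPred p then (some p.length, [p.headI]) else (none, acc) := by
  cases p with
  | nil => simp [aStep, bPred]
  | cons h t =>
    simp only [aStep, bPred, List.headI]
    cases hin : PySem.Str.isIn ".test_" h <;> simp

theorem minAll_cons (p : List String) (xs : List (List String)) (m : Nat) :
    minAll (p :: xs) m = if bPred p then minAll xs (min m p.length) else minAll xs m := by
  by_cases h : bPred p = true <;> simp [minAll, h]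

theorem firsts_cons (p : List String) (xs : List (List String)) (k : Nat) :
    firsts (p :: xs) k =
      (if bPred p ∧ p.length = k then [p.headI] else []) ++ firsts xs k := by
  by_cases h : bPred p = true <;> by_cases hl : p.length = k <;> simp [firsts, h, hl]

theorem loop_some (xs : List (List String)) (m : Nat) (acc : List String) :
    xs.foldl aStep (some m, acc) =
      (some (minAll xs m), (if minAll xs m = m then acc else []) ++ firsts xs (minAll xs m)) := by
  induction xs generalizing m acc with
  | nil => simp [minAll, firsts]
  | cons p xs ih =>
    rw [List.foldl_cons, aStep_some, minAll_cons, firsts_cons]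
    by_cases hp : bPred p = true
    · rw [if_pos hp]
      simp only [hp, if_true, true_and]
      rcases lt_trichotomy p.length m with hlt | heq | hgt
      · rw [if_pos hlt, ih]
        have hmm : min m p.length = p.length := by omega
        rw [hmm]
        have hle : minAll xs p.length ≤ p.length := minAll_le xs p.length
        rw [if_neg (by omega : ¬ minAll xs p.length = m)]
        by_cases hM : minAll xs p.length = p.length
        · simp [hM]
        · rw [if_neg hM, if_neg (Ne.symm hM)]; simp
      · rw [if_neg (by omega), if_pos heq, ih]
        have hmm : min m p.length = m := by omega
        rw [hmm]
        by_cases hM : minAll xs m = m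
        · rw [if_pos hM, if_pos hM, heq, if_pos hM.symm]
          simp
        · rw [if_neg hM, if_neg hM, heq, if_neg (fun h => hM (Eq.symm h))]
          simp
      · rw [if_neg (by omega), if_neg (by omega), ih]
        have hmm : min m p.length = m := by omega
        rw [hmm]
        have hle : minAll xs m ≤ m := minAll_le xs m
        rw [if_neg (by omega : ¬ p.length = minAll xs m)]
        simp
    · rw [if_neg hp]
      simp only [hp, if_false, Bool.false_eq_true, false_and]
      rw [ih]
      simp

theorem loop_none (xs : List (List String)) :
    xs.foldl aStep (none, []) =
      (match xs.filter bPred with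
       | [] => ((none : Option Nat), ([] : List String))
       | v :: vs =>
         (some ((vs.map List.length).foldl min v.length),
          firsts xs ((vs.map List.length).foldl min v.length))) := by
  induction xs with
  | nil => simp
  | cons p xs ih =>
    rw [List.foldl_cons, aStep_none]
    by_cases hp : bPred p = true
    · have hf : (p :: xs).filter bPred = p :: xs.filter bPred := by simp [hp]
      rw [if_pos hp, loop_some, hf]
      have hk : ((xs.filter bPred).map List.length).foldl min p.length = minAll xs p.length := rfl
      simp only [hk, firsts_cons, hp, true_and]
      by_cases hM : minAll xs p.length = p.length
      · simp [hM]
      · rw [if_neg hM, if_neg (Ne.symm hM)]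
    · have hf : (p :: xs).filter bPred = xs.filter bPred := by simp [hp]
      rw [if_neg hp, ih, hf]
      cases hc : xs.filter bPred with
      | nil => rfl
      | cons v vs =>
        simp only []
        rw [firsts_cons]
        simp [hp]

theorem eq_main (paths : List (List String)) :
    get_closest_tests paths = get_closest_tests_alt paths := by
  unfold get_closest_tests get_closest_tests_alt
  rw [loop_none]
  cases hf : paths.filter bPred with
  | nil => rfl
  | cons v vs =>
    simp only [firsts]
    rw [hf]

-- ===== VERDICT (by name: the statement is the Claim_ definition above) =====
theorem get_closest_tests_spec : Claim_equal_get_closest_tests := by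
  intro paths _
  unfold Spec_get_closest_tests
  exact eq_main paths
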